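-- pv_equiv track=rewrite | github.com/Morovanuuu/Proiect-Prelucrarea-Imaginilor- | image_filters.py | get_invers
-- ===== SOURCE A (Python) =====
-- def get_invers(m):
--     """Aplica filtrul de imagine negativa (inversare culori)."""
--     h, w = len(m), len(m[0])
--     res_inv, res_r, res_g, res_b = [], [], [], []
--     for y in range(h):
--         row_inv, row_r, row_g, row_b = [], [], [], []
--         for x in range(w):
--             r, g, b = m[y][x]
--             r_inv, g_inv, b_inv = 255 - r, 255 - g, 255 - b
--             row_inv.append([r_inv, g_inv, b_inv])
--             row_r.append([r_inv, 0, 0])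
--             row_g.append([0, g_inv, 0])
--             row_b.append([0, 0, b_inv])
--         res_inv.append(row_inv);
--         res_r.append(row_r);
--         res_g.append(row_g);
--         res_b.append(row_b)
--     return res_inv, res_r, res_g, res_b
-- ===== SOURCE B (Python) =====
-- def get_invers(m):
--     """Aplica filtrul de imagine negativa (inversare culori)."""
--     w = len(m[0])
--     res_inv = [[[255 - r, 255 - g, 255 - b] for r, g, b in row[:w]] for row in m]
--     res_r = [[[px[0], 0, 0] for px in row] for row in res_inv]
--     res_g = [[[0, px[1], 0] for px in row] for row in res_inv]
--     res_b = [[[0, 0, px[2]] for px in row] for row in res_inv]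
--     return res_inv, res_r, res_g, res_b
-- ===== Notes on version B (the rewrite author's own statement) =====
-- stated objective: alternative
-- what changed: B builds the negative image once in a single comprehension and derives the three single-channel images as separate projection passes over that result, instead of A's index-driven nested loops accumulating four row lists simultaneously.
import Mathlib
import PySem

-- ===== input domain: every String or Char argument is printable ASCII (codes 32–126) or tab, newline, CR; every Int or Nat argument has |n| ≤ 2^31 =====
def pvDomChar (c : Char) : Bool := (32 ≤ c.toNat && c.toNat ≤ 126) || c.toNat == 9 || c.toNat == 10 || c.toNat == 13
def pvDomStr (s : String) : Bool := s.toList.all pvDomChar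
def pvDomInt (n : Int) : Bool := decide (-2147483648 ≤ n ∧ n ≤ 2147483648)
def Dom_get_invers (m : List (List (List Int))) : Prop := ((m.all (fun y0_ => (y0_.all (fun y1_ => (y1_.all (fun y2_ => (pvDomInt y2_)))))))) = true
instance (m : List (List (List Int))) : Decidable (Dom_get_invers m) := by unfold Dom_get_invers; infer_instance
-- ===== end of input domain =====

-- B builds the negative image once and derives the three channel images by separate projection passes,
-- instead of A's four simultaneous accumulators in index-driven nested loops; same cost, different decomposition.

-- ===== PORT A =====
def get_invers (m : List (List (List Int))) : List (List (List Int)) × List (List (List Int)) × List (List (List Int)) × List (List (List Int)) :=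
  let h : Int := m.length
  let w : Int := (PySem.List.pyGetD m 0 []).length
  (PySem.List.pyRange 0 h).foldl
    (fun (res : List (List (List Int)) × List (List (List Int)) × List (List (List Int)) × List (List (List Int))) y =>
      let row := (PySem.List.pyRange 0 w).foldl
        (fun (row : List (List Int) × List (List Int) × List (List Int) × List (List Int)) x =>
          let px := PySem.List.pyGetD (PySem.List.pyGetD m y []) x []
          let r := PySem.List.pyGetD px 0 0
          let g := PySem.List.pyGetD px 1 0
          let b := PySem.List.pyGetD px 2 0
          let r_inv := 255 - r
          let g_inv := 255 - g
          let b_inv := 255 - b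
          (row.1 ++ [[r_inv, g_inv, b_inv]], row.2.1 ++ [[r_inv, 0, 0]],
           row.2.2.1 ++ [[0, g_inv, 0]], row.2.2.2 ++ [[0, 0, b_inv]]))
        ([], [], [], [])
      (res.1 ++ [row.1], res.2.1 ++ [row.2.1], res.2.2.1 ++ [row.2.2.1], res.2.2.2 ++ [row.2.2.2]))
    ([], [], [], [])

-- ===== PORT B =====
def pixNeg (px : List Int) : List Int :=
  [255 - PySem.List.pyGetD px 0 0, 255 - PySem.List.pyGetD px 1 0, 255 - PySem.List.pyGetD px 2 0]

def get_invers_alt (m : List (List (List Int))) : List (List (List Int)) × List (List (List Int)) × List (List (List Int)) × List (List (List Int)) :=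
  let w : Int := (PySem.List.pyGetD m 0 []).length
  let res_inv := m.map (fun row => (PySem.List.slice row none (some w)).map pixNeg)
  let res_r := res_inv.map (fun row => row.map (fun px => [PySem.List.pyGetD px 0 0, 0, 0]))
  let res_g := res_inv.map (fun row => row.map (fun px => [0, PySem.List.pyGetD px 1 0, 0]))
  let res_b := res_inv.map (fun row => row.map (fun px => [0, 0, PySem.List.pyGetD px 2 0]))
  (res_inv, res_r, res_g, res_b)

-- ===== PRECONDITION & SPEC =====
-- Pre_ excludes exactly the inputs where the Python A raises: an empty image (m[0] is an
-- IndexError), a row shorter than the first row (IndexError on m[y][x]), or an accessed pixel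
-- that is not a 3-element list (unpacking 'r, g, b = m[y][x]' raises ValueError).
def Pre_get_invers (m : List (List (List Int))) : Prop :=
  m ≠ [] ∧ ∀ row ∈ m, (m.headD []).length ≤ row.length ∧
    ∀ px ∈ row.take (m.headD []).length, px.length = 3
instance (m : List (List (List Int))) : Decidable (Pre_get_invers m) := by unfold Pre_get_invers; infer_instance
def pvWitness_get_invers : List (List (List Int)) := [[[1, 2, 3], [0, 255, 7]], [[4, 5, 6], [9, 9, 9]]]
def Spec_get_invers (m : List (List (List Int))) (out : List (List (List Int)) × List (List (List Int)) × List (List (List Int)) × List (List (List Int))) : Prop := out = get_invers_alt m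
instance (m : List (List (List Int))) (out : List (List (List Int)) × List (List (List Int)) × List (List (List Int)) × List (List (List Int))) : Decidable (Spec_get_invers m out) := by unfold Spec_get_invers; infer_instance

-- ===== CLAIM (what is proved, stated in full; the proofs are below) =====
def Claim_equal_get_invers : Prop := ∀ (m : List (List (List Int))), Dom_get_invers m → Pre_get_invers m → Spec_get_invers m (get_invers m)

-- ===== LEMMAS AND PROOFS =====

-- a loop with four independent append accumulators is four maps
theorem foldl_quad {α β : Type} (F : (List β × List β × List β × List β) → α → (List β × List β × List β × List β))
    (f1 f2 f3 f4 : α → β)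
    (hF : ∀ s x, F s x = (s.1 ++ [f1 x], s.2.1 ++ [f2 x], s.2.2.1 ++ [f3 x], s.2.2.2 ++ [f4 x]))
    (L : List α) : ∀ (a b c d : List β),
    L.foldl F (a, b, c, d) = (a ++ L.map f1, b ++ L.map f2, c ++ L.map f3, d ++ L.map f4) := by
  induction L with
  | nil => intro a b c d; simp
  | cons x L ih => intro a b c d; simp [List.foldl_cons, hF, ih]

-- 'for y in range(len(m)): … m[y] …' is a map over m
theorem map_rows {α β : Type} (g : List α → β) (d : List α) (m : List (List α)) :
    (PySem.List.pyRange 0 (m.length : Int)).map (fun y => g (PySem.List.pyGetD m y d)) = m.map g := by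
  conv_rhs => rw [← PySem.List.map_pyGetD_pyRange_zero' m d]
  rw [List.map_map]
  rfl

-- 'for x in range(w): … row[x] …' with w ≤ len(row) is a map over row.take w
theorem map_row_take {β : Type} (f : List Int → β) (row : List (List Int)) (w : Nat)
    (hw : w ≤ row.length) :
    (PySem.List.pyRange 0 (w : Int)).map (fun x => f (PySem.List.pyGetD row x [])) =
      (row.take w).map f := by
  have h1 : (row.take w).map f =
      ((PySem.List.pyRange 0 (((row.take w).length : Nat) : Int)).map
        (fun j => PySem.List.pyGetD (row.take w) j [])).map f := by
    rw [PySem.List.map_pyGetD_pyRange_zero']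
  rw [h1, List.map_map, List.length_take, Nat.min_eq_left hw]
  refine List.map_congr_left ?_
  intro x hx
  rcases PySem.List.mem_pyRange_one.mp hx with ⟨hx0, hxw⟩
  have hxlen : x < (row.length : Int) := lt_of_lt_of_le hxw (by exact_mod_cast hw)
  have hxlen' : x < ((row.take w).length : Int) := by
    rw [List.length_take, Nat.min_eq_left hw]; exact hxw
  simp only [Function.comp]
  rw [PySem.List.pyGetD_eq_getElem row [] hx0 hxlen,
      PySem.List.pyGetD_eq_getElem (row.take w) [] hx0 hxlen',
      List.getElem_take]

-- under Pre_, m[0] is m's head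
theorem pyGetD_head {α : Type} (m : List (List α)) (hm : m ≠ []) :
    PySem.List.pyGetD m 0 [] = m.headD [] := by
  cases m with
  | nil => exact absurd rfl hm
  | cons a l => rw [PySem.List.pyGetD_zero_cons]; rfl

-- ===== VERDICT (by name: the statement is the Claim_ definition above) =====
theorem get_invers_spec : Claim_equal_get_invers := by
  intro m _ hpre
  obtain ⟨hm, hrows⟩ := hpre
  unfold Spec_get_invers
  have hslice : ∀ row : List (List Int),
      PySem.List.slice row none (some (((m.headD []).length : Nat) : Int)) = row.take (m.headD []).length := by
    intro row
    rw [PySem.List.slice_to row (by positivity)]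
    simp
  -- A's inner loop collapses to four maps over range(w)
  have hinner : ∀ r : List (List Int),
      (PySem.List.pyRange 0 (((m.headD []).length : Nat) : Int)).foldl
        (fun (s : List (List Int) × List (List Int) × List (List Int) × List (List Int)) x =>
          (s.1 ++ [[255 - PySem.List.pyGetD (PySem.List.pyGetD r x []) 0 0,
                    255 - PySem.List.pyGetD (PySem.List.pyGetD r x []) 1 0,
                    255 - PySem.List.pyGetD (PySem.List.pyGetD r x []) 2 0]],
           s.2.1 ++ [[255 - PySem.List.pyGetD (PySem.List.pyGetD r x []) 0 0, 0, 0]],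
           s.2.2.1 ++ [[0, 255 - PySem.List.pyGetD (PySem.List.pyGetD r x []) 1 0, 0]],
           s.2.2.2 ++ [[0, 0, 255 - PySem.List.pyGetD (PySem.List.pyGetD r x []) 2 0]]))
        ([], [], [], [])
      = ((PySem.List.pyRange 0 (((m.headD []).length : Nat) : Int)).map
           (fun x => pixNeg (PySem.List.pyGetD r x [])),
         (PySem.List.pyRange 0 (((m.headD []).length : Nat) : Int)).map
           (fun x => [255 - PySem.List.pyGetD (PySem.List.pyGetD r x []) 0 0, 0, 0]),
         (PySem.List.pyRange 0 (((m.headD []).length : Nat) : Int)).map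
           (fun x => [0, 255 - PySem.List.pyGetD (PySem.List.pyGetD r x []) 1 0, 0]),
         (PySem.List.pyRange 0 (((m.headD []).length : Nat) : Int)).map
           (fun x => [0, 0, 255 - PySem.List.pyGetD (PySem.List.pyGetD r x []) 2 0])) := by
    intro r
    exact (foldl_quad _
      (fun x => pixNeg (PySem.List.pyGetD r x []))
      (fun x => [255 - PySem.List.pyGetD (PySem.List.pyGetD r x []) 0 0, 0, 0])
      (fun x => [0, 255 - PySem.List.pyGetD (PySem.List.pyGetD r x []) 1 0, 0])
      (fun x => [0, 0, 255 - PySem.List.pyGetD (PySem.List.pyGetD r x []) 2 0])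
      (fun s x => rfl) _ [] [] [] []).trans (by simp [pixNeg])
  -- A equals four row-level maps over m
  have hA : get_invers m =
      (m.map (fun row => (PySem.List.pyRange 0 (((m.headD []).length : Nat) : Int)).map
          (fun x => pixNeg (PySem.List.pyGetD row x []))),
       m.map (fun row => (PySem.List.pyRange 0 (((m.headD []).length : Nat) : Int)).map
          (fun x => [255 - PySem.List.pyGetD (PySem.List.pyGetD row x []) 0 0, 0, 0])),
       m.map (fun row => (PySem.List.pyRange 0 (((m.headD []).length : Nat) : Int)).map
          (fun x => [0, 255 - PySem.List.pyGetD (PySem.List.pyGetD row x []) 1 0, 0])),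
       m.map (fun row => (PySem.List.pyRange 0 (((m.headD []).length : Nat) : Int)).map
          (fun x => [0, 0, 255 - PySem.List.pyGetD (PySem.List.pyGetD row x []) 2 0]))) := by
    have h1 : get_invers m =
        ((PySem.List.pyRange 0 ((m.length : Nat) : Int)).map (fun y =>
            (fun row => (PySem.List.pyRange 0 (((m.headD []).length : Nat) : Int)).map
              (fun x => pixNeg (PySem.List.pyGetD row x []))) (PySem.List.pyGetD m y [])),
         (PySem.List.pyRange 0 ((m.length : Nat) : Int)).map (fun y =>
            (fun row => (PySem.List.pyRange 0 (((m.headD []).length : Nat) : Int)).map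
              (fun x => [255 - PySem.List.pyGetD (PySem.List.pyGetD row x []) 0 0, 0, 0])) (PySem.List.pyGetD m y [])),
         (PySem.List.pyRange 0 ((m.length : Nat) : Int)).map (fun y =>
            (fun row => (PySem.List.pyRange 0 (((m.headD []).length : Nat) : Int)).map
              (fun x => [0, 255 - PySem.List.pyGetD (PySem.List.pyGetD row x []) 1 0, 0])) (PySem.List.pyGetD m y [])),
         (PySem.List.pyRange 0 ((m.length : Nat) : Int)).map (fun y =>
            (fun row => (PySem.List.pyRange 0 (((m.headD []).length : Nat) : Int)).map
              (fun x => [0, 0, 255 - PySem.List.pyGetD (PySem.List.pyGetD row x []) 2 0])) (PySem.List.pyGetD m y []))) := by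
      simp only [get_invers, pyGetD_head m hm]
      exact (foldl_quad _
          (fun y => (fun row => (PySem.List.pyRange 0 (((m.headD []).length : Nat) : Int)).map
              (fun x => pixNeg (PySem.List.pyGetD row x []))) (PySem.List.pyGetD m y []))
          (fun y => (fun row => (PySem.List.pyRange 0 (((m.headD []).length : Nat) : Int)).map
              (fun x => [255 - PySem.List.pyGetD (PySem.List.pyGetD row x []) 0 0, 0, 0])) (PySem.List.pyGetD m y []))
          (fun y => (fun row => (PySem.List.pyRange 0 (((m.headD []).length : Nat) : Int)).map
              (fun x => [0, 255 - PySem.List.pyGetD (PySem.List.pyGetD row x []) 1 0, 0])) (PySem.List.pyGetD m y []))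
          (fun y => (fun row => (PySem.List.pyRange 0 (((m.headD []).length : Nat) : Int)).map
              (fun x => [0, 0, 255 - PySem.List.pyGetD (PySem.List.pyGetD row x []) 2 0])) (PySem.List.pyGetD m y []))
          (fun s y => by rw [hinner (PySem.List.pyGetD m y [])])
          (PySem.List.pyRange 0 ((m.length : Nat) : Int)) [] [] [] []).trans (by simp)
    exact h1.trans (by
      refine Prod.ext ?_ (Prod.ext ?_ (Prod.ext ?_ ?_)) <;> dsimp only
      · exact map_rows (fun row => (PySem.List.pyRange 0 (((m.headD []).length : Nat) : Int)).map
          (fun x => pixNeg (PySem.List.pyGetD row x []))) [] m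
      · exact map_rows (fun row => (PySem.List.pyRange 0 (((m.headD []).length : Nat) : Int)).map
          (fun x => [255 - PySem.List.pyGetD (PySem.List.pyGetD row x []) 0 0, 0, 0])) [] m
      · exact map_rows (fun row => (PySem.List.pyRange 0 (((m.headD []).length : Nat) : Int)).map
          (fun x => [0, 255 - PySem.List.pyGetD (PySem.List.pyGetD row x []) 1 0, 0])) [] m
      · exact map_rows (fun row => (PySem.List.pyRange 0 (((m.headD []).length : Nat) : Int)).map
          (fun x => [0, 0, 255 - PySem.List.pyGetD (PySem.List.pyGetD row x []) 2 0])) [] m)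
  -- B equals projections of the same maps, row by row
  rw [hA]
  show _ = get_invers_alt m
  simp only [get_invers_alt, pyGetD_head m hm, hslice, List.map_map]
  refine Prod.ext ?_ (Prod.ext ?_ (Prod.ext ?_ ?_)) <;> refine List.map_congr_left ?_ <;> intro row hrow
  · exact (map_row_take pixNeg row (m.headD []).length (hrows row hrow).1).trans rfl
  · refine (map_row_take (fun px => [255 - PySem.List.pyGetD px 0 0, 0, 0]) row
        (m.headD []).length (hrows row hrow).1).trans ?_
    simp only [Function.comp_apply, Function.comp_def, List.map_map]
    refine List.map_congr_left ?_
    intro px _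
    simp [pixNeg, PySem.List.pyGetD_ofNat', List.getD]
  · refine (map_row_take (fun px => [0, 255 - PySem.List.pyGetD px 1 0, 0]) row
        (m.headD []).length (hrows row hrow).1).trans ?_
    simp only [Function.comp_apply, Function.comp_def, List.map_map]
    refine List.map_congr_left ?_
    intro px _
    simp [pixNeg, PySem.List.pyGetD_ofNat', List.getD]
  · refine (map_row_take (fun px => [0, 0, 255 - PySem.List.pyGetD px 2 0]) row
        (m.headD []).length (hrows row hrow).1).trans ?_
    simp only [Function.comp_apply, Function.comp_def, List.map_map]
    refine List.map_congr_left ?_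
    intro px _
    simp [pixNeg, PySem.List.pyGetD_ofNat', List.getD]
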